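-- pv_equiv track=rewrite | github.com/proteetpaul/Attribute-Based-Access-Control | CND Tree/ndds_functions.py | UnionAll
-- ===== SOURCE A (Python) =====
-- def UnionAll(arr, length):  # checked
--     """ Calculate union of serialised sets present in arr"""
--     res=""
--     res1 = list()
--     for i in range(0,length):
--         res1.append('0')
--     for s in arr:
--         for i in range(0,length):
--             if s[i]=='1':
--                 res1[i]='1'
--     for c in res1:
--         res = res+c
--     return res
-- ===== SOURCE B (Python) =====
-- def UnionAll(arr, length):
--     """ Calculate union of serialised sets present in arr"""
--     return ''.join('1' if any(s[i] == '1' for s in arr) else '0'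
--                    for i in range(length))
-- ===== Notes on version B (the rewrite author's own statement) =====
-- stated objective: simpler
-- what changed: Column-major instead of row-major: each output character is computed independently as an any-over-strings test at that position and joined, replacing A's mutable accumulator list, per-string marking pass and final character-by-character concatenation.
import Mathlib
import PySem

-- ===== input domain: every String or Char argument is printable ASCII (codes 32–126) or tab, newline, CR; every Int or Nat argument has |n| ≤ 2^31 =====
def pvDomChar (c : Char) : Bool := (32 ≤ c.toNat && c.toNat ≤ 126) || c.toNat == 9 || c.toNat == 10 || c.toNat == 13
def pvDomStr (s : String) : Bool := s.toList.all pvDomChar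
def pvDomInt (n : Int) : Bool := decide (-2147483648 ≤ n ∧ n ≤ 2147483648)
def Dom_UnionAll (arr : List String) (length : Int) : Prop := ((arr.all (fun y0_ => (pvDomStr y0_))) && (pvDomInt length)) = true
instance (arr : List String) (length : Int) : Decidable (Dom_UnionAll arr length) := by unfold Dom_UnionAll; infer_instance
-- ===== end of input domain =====

-- B computes each output character independently (column-major any-over-strings join) instead of
-- A's row-major marking of a mutable accumulator list; objective: simpler.

-- ===== PORT A =====
def UnionAll (arr : List String) (length : Int) : String :=
  String.ofList
    ((arr.foldl
        (fun res1 s =>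
          (PySem.List.pyRange 0 length 1).foldl
            (fun acc i => if PySem.Str.pyGet? s i == some '1' then acc.set i.toNat '1' else acc)
            res1)
        ((PySem.List.pyRange 0 length 1).foldl (fun acc _ => acc ++ ['0']) [])
     ).foldl (fun r c => r ++ [c]) [])

-- ===== PORT B =====
def UnionAll_alt (arr : List String) (length : Int) : String :=
  String.ofList
    ((PySem.List.pyRange 0 length 1).map (fun i =>
      if arr.any (fun s => PySem.Str.pyGet? s i == some '1') then '1' else '0'))

-- ===== PRECONDITION & SPEC =====
-- Pre_ excludes exactly the inputs on which A raises IndexError: some string shorter than `length`.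
def Pre_UnionAll (arr : List String) (length : Int) : Prop :=
  ∀ s ∈ arr, length ≤ PySem.Str.len s
instance (arr : List String) (length : Int) : Decidable (Pre_UnionAll arr length) := by
  unfold Pre_UnionAll; infer_instance
def pvWitness_UnionAll : List String × Int := (["100", "011"], 3)

def Spec_UnionAll (arr : List String) (length : Int) (out : String) : Prop := out = UnionAll_alt arr length
instance (arr : List String) (length : Int) (out : String) : Decidable (Spec_UnionAll arr length out) := by unfold Spec_UnionAll; infer_instance

-- ===== CLAIM (what is proved, stated in full; the proofs are below) =====
def Claim_equal_UnionAll : Prop := ∀ (arr : List String) (length : Int), Dom_UnionAll arr length → Pre_UnionAll arr length → Spec_UnionAll arr length (UnionAll arr length)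

-- ===== LEMMAS AND PROOFS =====

-- A's inner loop (one string), over Nat indices
def pvInner (g : Nat → Bool) (n : Nat) (acc : List Char) : List Char :=
  (List.range n).foldl (fun acc k => if g k then acc.set k '1' else acc) acc

-- A's outer loop over the strings
def pvOuter (arr : List String) (n : Nat) (acc : List Char) : List Char :=
  arr.foldl (fun acc s => pvInner (fun k => s.toList[k]? == some '1') n acc) acc

theorem pvInner_length (g : Nat → Bool) (n : Nat) (acc : List Char) :
    (pvInner g n acc).length = acc.length := by
  induction n with
  | zero => simp [pvInner]
  | succ m ih =>
      simp only [pvInner, List.range_succ, List.foldl_append, List.foldl_cons, List.foldl_nil]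
      split <;> simp [pvInner] at ih ⊢ <;> omega

theorem pvInner_getElem? (g : Nat → Bool) (n : Nat) (acc : List Char) (j : Nat) :
    (pvInner g n acc)[j]? =
      if j < n ∧ j < acc.length ∧ g j then some '1' else acc[j]? := by
  induction n with
  | zero => simp [pvInner]
  | succ m ih =>
      have hlen := pvInner_length g m acc
      simp only [pvInner, List.range_succ, List.foldl_append, List.foldl_cons,
        List.foldl_nil] at ih hlen ⊢
      by_cases hg : g m = true
      · rw [if_pos hg, List.getElem?_set, ih, hlen]
        by_cases hjm : m = j
        · subst hjm
          by_cases hl : m < acc.length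
          · rw [if_pos rfl, if_pos hl, if_pos ⟨by omega, hl, hg⟩]
          · rw [if_pos rfl, if_neg hl, if_neg (fun h => hl h.2.1),
              List.getElem?_eq_none (by omega)]
        · rw [if_neg hjm]
          by_cases h1 : j < m ∧ j < acc.length ∧ g j = true
          · rw [if_pos h1, if_pos ⟨by omega, h1.2⟩]
          · rw [if_neg h1, if_neg (fun h => h1 ⟨by omega, h.2⟩)]
      · rw [if_neg hg, ih]
        by_cases h1 : j < m ∧ j < acc.length ∧ g j = true
        · rw [if_pos h1, if_pos ⟨by omega, h1.2⟩]
        · rw [if_neg h1, if_neg ?_]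
          rintro ⟨a, b, c⟩
          rcases Nat.lt_or_eq_of_le (Nat.lt_succ_iff.mp a) with h' | h'
          · exact h1 ⟨h', b, c⟩
          · exact hg (h' ▸ c)

theorem pvOuter_getElem? (arr : List String) (n : Nat) (acc : List Char) (j : Nat) :
    (pvOuter arr n acc)[j]? =
      if j < n ∧ j < acc.length ∧ arr.any (fun s => s.toList[j]? == some '1') then some '1'
      else acc[j]? := by
  induction arr generalizing acc with
  | nil => simp [pvOuter]
  | cons s rest ih =>
      simp only [pvOuter, List.foldl_cons] at ih ⊢
      rw [ih, pvInner_length, pvInner_getElem?]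
      by_cases hjn : j < n ∧ j < acc.length
      · simp only [List.any_cons]
        by_cases hs : (s.toList[j]? == some '1') = true
        · simp [hjn.1, hjn.2, hs]
        · simp [hjn.1, hjn.2, hs]
      · rw [if_neg (fun h => hjn ⟨h.1, h.2.1⟩), if_neg (fun h => hjn ⟨h.1, h.2.1⟩),
          if_neg (fun h => hjn ⟨h.1, h.2.1⟩)]

theorem pvFoldl_append_singleton (l : List Char) (init : List Char) :
    l.foldl (fun r c => r ++ [c]) init = init ++ l := by
  induction l generalizing init with
  | nil => simp
  | cons c rest ih => simp [ih]

theorem pvFoldl_replicate (l : List Int) (acc : List Char) :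
    l.foldl (fun acc _ => acc ++ ['0']) acc = acc ++ List.replicate l.length '0' := by
  induction l generalizing acc with
  | nil => simp
  | cons x rest ih =>
      simp [ih, List.replicate_succ, List.append_assoc]

-- ===== VERDICT (by name: the statement is the Claim_ definition above) =====
theorem UnionAll_spec : Claim_equal_UnionAll := by
  intro arr length _hdom _hpre
  unfold Spec_UnionAll UnionAll UnionAll_alt
  rw [PySem.List.pyRange_one]
  set n : Nat := ((length : Int) - 0).toNat with hn
  rw [pvFoldl_replicate, pvFoldl_append_singleton]
  simp only [List.nil_append, List.length_map, List.length_range]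
  simp only [List.foldl_map, List.map_map, zero_add,
    PySem.Str.pyGet?_natCast, Int.toNat_natCast]
  apply congrArg
  apply List.ext_getElem?
  intro j
  show (pvOuter arr n (List.replicate n '0'))[j]? = _
  rw [pvOuter_getElem?]
  simp only [List.length_replicate, List.getElem?_replicate, List.getElem?_map]
  by_cases hj : j < n
  · rw [List.getElem?_range hj]
    simp [hj, apply_ite]
  · rw [List.getElem?_eq_none (by simpa using hj), if_neg (fun h => hj h.1)]
    simp [hj]
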